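-- pv_equiv track=rewrite | github.com/steliosot/comfy-agent | comfy_agent/workflow.py | _trace_metrics
-- ===== SOURCE A (Python) =====
-- def _trace_metrics(trace):
--     executed = 0
--     skipped = 0
--     cache_hits = 0
--     cache_misses = 0
--     sampler_runs = 0
--     for item in trace:
--         event = item.get("event")
--         class_type = item.get("class_type")
--         if event == "execute":
--             executed += 1
--             if class_type == "KSampler":
--                 sampler_runs += 1
--         elif event == "skip":
--             skipped += 1
--         elif event == "cache_hit":
--             cache_hits += 1
--         elif event == "cache_miss":
--             cache_misses += 1
--     return {
--         "executed_nodes": executed,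
--         "skipped_nodes": skipped,
--         "cache_hits": cache_hits,
--         "cache_misses": cache_misses,
--         "sampler_runs": sampler_runs,
--     }
-- ===== SOURCE B (Python) =====
-- def _trace_metrics(trace):
--     counts = {}
--     for item in trace:
--         ev = item.get("event")
--         counts[ev] = counts.get(ev, 0) + 1
--     sampler_runs = sum(
--         1 for item in trace
--         if item.get("event") == "execute" and item.get("class_type") == "KSampler"
--     )
--     return {
--         "executed_nodes": counts.get("execute", 0),
--         "skipped_nodes": counts.get("skip", 0),
--         "cache_hits": counts.get("cache_hit", 0),
--         "cache_misses": counts.get("cache_miss", 0),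
--         "sampler_runs": sampler_runs,
--     }
-- ===== Notes on version B (the rewrite author's own statement) =====
-- stated objective: alternative
-- what changed: Replaces A's five-counter if/elif loop with a one-pass event-frequency table (dict tally) read off for the four event kinds, plus a separate filtering pass for the nested KSampler case.
import Mathlib
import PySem

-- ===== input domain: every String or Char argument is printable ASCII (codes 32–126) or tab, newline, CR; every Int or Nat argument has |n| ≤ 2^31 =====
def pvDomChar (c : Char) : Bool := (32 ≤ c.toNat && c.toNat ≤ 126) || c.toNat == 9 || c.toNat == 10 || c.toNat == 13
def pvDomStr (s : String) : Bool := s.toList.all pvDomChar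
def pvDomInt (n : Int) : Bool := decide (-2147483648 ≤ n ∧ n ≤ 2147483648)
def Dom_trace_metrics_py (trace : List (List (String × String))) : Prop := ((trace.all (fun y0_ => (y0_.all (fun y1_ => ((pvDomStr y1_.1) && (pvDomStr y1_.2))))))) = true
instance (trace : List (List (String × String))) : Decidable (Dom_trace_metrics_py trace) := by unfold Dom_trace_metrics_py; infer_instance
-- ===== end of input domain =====

-- B replaces A's five-counter if/elif loop by a one-pass event tally (dict) read off per
-- event kind, plus a separate filtering pass for the nested KSampler case (objective: alternative).

-- item.get(k): first-match lookup in the association list (shared helper of both ports)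
def dget (item : List (String × String)) (k : String) : Option String :=
  (item.find? (fun p => p.1 == k)).map (·.2)

-- ===== PORT A =====
-- the loop body of A, on the state (executed, skipped, cache_hits, cache_misses, sampler_runs)
def stepA (st : Int × Int × Int × Int × Int) (item : List (String × String)) :
    Int × Int × Int × Int × Int :=
  let (e, s, h, m, r) := st
  let event := dget item "event"
  let class_type := dget item "class_type"
  if event == some "execute" then
    (e + 1, s, h, m, if class_type == some "KSampler" then r + 1 else r)
  else if event == some "skip" then (e, s + 1, h, m, r)
  else if event == some "cache_hit" then (e, s, h + 1, m, r)
  else if event == some "cache_miss" then (e, s, h, m + 1, r)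
  else (e, s, h, m, r)

def trace_metrics_py (trace : List (List (String × String))) : List (String × Int) :=
  let st := trace.foldl stepA (0, 0, 0, 0, 0)
  [("executed_nodes", st.1), ("skipped_nodes", st.2.1), ("cache_hits", st.2.2.1),
   ("cache_misses", st.2.2.2.1), ("sampler_runs", st.2.2.2.2)]

-- ===== PORT B =====
def trace_metrics_py_alt (trace : List (List (String × String))) : List (String × Int) :=
  let counts := trace.foldl
    (fun (d : PySem.Dict (Option String) Int) item =>
      let ev := dget item "event"
      d.insert ev (d.getD ev 0 + 1)) PySem.Dict.empty
  let sampler_runs : Int :=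
    ((trace.filter (fun item =>
        dget item "event" == some "execute" && dget item "class_type" == some "KSampler")).length : Int)
  [("executed_nodes", counts.getD (some "execute") 0),
   ("skipped_nodes", counts.getD (some "skip") 0),
   ("cache_hits", counts.getD (some "cache_hit") 0),
   ("cache_misses", counts.getD (some "cache_miss") 0),
   ("sampler_runs", sampler_runs)]

-- ===== PRECONDITION & SPEC =====
def Spec_trace_metrics_py (trace : List (List (String × String))) (out : List (String × Int)) : Prop := out = trace_metrics_py_alt trace
instance (trace : List (List (String × String))) (out : List (String × Int)) : Decidable (Spec_trace_metrics_py trace out) := by unfold Spec_trace_metrics_py; infer_instance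

-- ===== CLAIM (what is proved, stated in full; the proofs are below) =====
def Claim_equal_trace_metrics_py : Prop := ∀ (trace : List (List (String × String))), Dom_trace_metrics_py trace → Spec_trace_metrics_py trace (trace_metrics_py trace)

-- ===== LEMMAS AND PROOFS =====
lemma foldA_eq (trace : List (List (String × String))) (e s h m r : Int) :
    trace.foldl stepA (e, s, h, m, r) =
      (e + trace.countP (fun it => dget it "event" == some "execute"),
       s + trace.countP (fun it => dget it "event" == some "skip"),
       h + trace.countP (fun it => dget it "event" == some "cache_hit"),
       m + trace.countP (fun it => dget it "event" == some "cache_miss"),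
       r + trace.countP (fun it =>
             dget it "event" == some "execute" && dget it "class_type" == some "KSampler")) := by
  induction trace generalizing e s h m r with
  | nil => simp
  | cons it tl ih =>
    simp only [List.foldl_cons, List.countP_cons, stepA]
    by_cases h1 : dget it "event" = some "execute"
    · by_cases h2 : dget it "class_type" = some "KSampler" <;>
        simp [h1, h2, ih] <;> omega
    · by_cases h2 : dget it "event" = some "skip"
      · simp [h2, ih]; omega
      · by_cases h3 : dget it "event" = some "cache_hit"
        · simp [h3, ih]; omega
        · by_cases h4 : dget it "event" = some "cache_miss"
          · simp [h4, ih]; omega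
          · simp [h1, h2, h3, h4, ih]

lemma counts_getD (trace : List (List (String × String))) (v : Option String) :
    (trace.foldl
      (fun (d : PySem.Dict (Option String) Int) item =>
        let ev := dget item "event"
        d.insert ev (d.getD ev 0 + 1)) PySem.Dict.empty).getD v 0 =
      (trace.countP (fun it => dget it "event" == v) : Int) := by
  have h : trace.foldl
      (fun (d : PySem.Dict (Option String) Int) item =>
        let ev := dget item "event"
        d.insert ev (d.getD ev 0 + 1)) PySem.Dict.empty =
      (trace.map (fun it => dget it "event")).foldl
        (fun d x => d.insert x (d.getD x 0 + 1)) PySem.Dict.empty := by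
    rw [List.foldl_map]
  rw [h, PySem.Dict.getD_foldl_insert_add_one]
  simp [List.count, List.countP_map, Function.comp_def]

-- ===== VERDICT (by name: the statement is the Claim_ definition above) =====
theorem trace_metrics_py_spec : Claim_equal_trace_metrics_py := by
  intro trace _
  unfold Spec_trace_metrics_py trace_metrics_py trace_metrics_py_alt
  simp only [foldA_eq, counts_getD, List.countP_eq_length_filter]
  norm_num
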